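-- pv_equiv track=rewrite | github.com/vad-s/planning_ai | main_bfs.py | to_ascii_tree
-- ===== SOURCE A (Python) =====
-- from typing import List, Tuple, Dict, Deque, Optional
--
-- def to_ascii_tree(adj: Dict[str, List[str]], root: str) -> str:
--     """
--     Render a simple ASCII tree (depth-first for formatting).
--     """
--     lines: List[str] = []
--     def dfs(name: str, prefix: str = "", is_last: bool = True):
--         connector = "└─ " if is_last else "├─ "
--         lines.append(prefix + connector + name)
--         children = adj.get(name, [])
--         for i, ch in enumerate(children):
--             last = i == len(children) - 1
--             new_prefix = prefix + ("   " if is_last else "│  ")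
--             dfs(ch, new_prefix, last)
--     lines.append(root)  # root top line (no connector)
--     kids = adj.get(root, [])
--     for i, k in enumerate(kids):
--         dfs(k, "", i == len(kids) - 1)
--     return "\n".join(lines)
-- ===== SOURCE B (Python) =====
-- def to_ascii_tree(adj, root):
--     """Iterative worklist DFS instead of A's recursion; same rendered output."""
--     lines = [root]
--     kids = adj.get(root, [])
--     stack = [(k, "", i == len(kids) - 1) for i, k in enumerate(kids)]
--     while stack:
--         name, prefix, is_last = stack.pop(0)
--         lines.append(prefix + ("└─ " if is_last else "├─ ") + name)
--         children = adj.get(name, [])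
--         new_prefix = prefix + ("   " if is_last else "│  ")
--         stack = [(ch, new_prefix, i == len(children) - 1) for i, ch in enumerate(children)] + stack
--     return "\n".join(lines)
-- ===== Notes on version B (the rewrite author's own statement) =====
-- stated objective: alternative
-- what changed: Replaced the nested recursive dfs closure appending to a shared list with an iterative worklist DFS: an explicit stack of (name, prefix, is_last) tuples processed in one while loop; Pre_ excludes adjacency dicts with a cycle reachable from root, on which A raises RecursionError (and B loops) rather than returning.
import Mathlib
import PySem

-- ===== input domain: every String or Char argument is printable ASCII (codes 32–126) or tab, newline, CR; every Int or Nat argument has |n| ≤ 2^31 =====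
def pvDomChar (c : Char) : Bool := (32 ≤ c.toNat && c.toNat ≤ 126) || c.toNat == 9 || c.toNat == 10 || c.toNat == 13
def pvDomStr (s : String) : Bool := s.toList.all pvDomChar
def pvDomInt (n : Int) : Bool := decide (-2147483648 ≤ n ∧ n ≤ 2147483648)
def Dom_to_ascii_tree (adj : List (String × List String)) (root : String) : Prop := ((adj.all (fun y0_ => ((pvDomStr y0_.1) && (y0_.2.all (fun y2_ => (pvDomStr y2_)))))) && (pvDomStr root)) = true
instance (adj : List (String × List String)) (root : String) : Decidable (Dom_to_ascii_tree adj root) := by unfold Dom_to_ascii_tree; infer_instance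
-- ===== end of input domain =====

-- B replaces A's recursive dfs closure with an iterative worklist (explicit stack) DFS; same output.

-- adj.get(name, []) — first-match association-list lookup (both sources call adj.get(…, []))
def adjGet (adj : List (String × List String)) (k : String) : List String :=
  (PySem.Dict.mk adj).getD k []

-- ===== PORT A =====
-- A's recursive dfs. The Nat argument is a totality guard only (a recursion-depth budget;
-- on inputs satisfying Pre_ every root path has distinct nodes, so it is never exhausted).
def dfsA (adj : List (String × List String)) : Nat → String → String → Bool → List String
  | 0, _, _, _ => []
  | fuel+1, name, pfx, is_last =>
    let connector := if is_last then "└─ " else "├─ "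
    let children := adjGet adj name
    let new_prefix := pfx ++ (if is_last then "   " else "│  ")
    (PySem.List.enumerate children).foldl
      (fun acc p =>
        acc ++ dfsA adj fuel p.2 new_prefix (decide (p.1 = (children.length : Int) - 1)))
      [pfx ++ connector ++ name]

def to_ascii_tree (adj : List (String × List String)) (root : String) : String :=
  let kids := adjGet adj root
  let lines := (PySem.List.enumerate kids).foldl
      (fun acc p =>
        acc ++ dfsA adj (adj.length + 2) p.2 "" (decide (p.1 = (kids.length : Int) - 1)))
      [root]
  PySem.Str.join "\n" lines

-- ===== PORT B =====
-- base for the termination measure of the worklist loop (max branching factor + 1)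
def degB (adj : List (String × List String)) : Nat :=
  (adj.map (fun p => p.2.length)).foldr max 0 + 1

lemma adjGet_length_lt_degB (adj : List (String × List String)) (k : String) :
    (adjGet adj k).length < degB adj := by
  unfold adjGet degB
  simp only [PySem.Dict.getD, PySem.Dict.get?]
  induction adj with
  | nil => simp
  | cons hd tl ih =>
    rw [List.map_cons, List.foldr_cons]
    by_cases h : (hd.1 == k)
    · simp [h]
    · simp only [List.find?_cons, h]
      have := Nat.le_max_right hd.2.length ((tl.map (fun p => p.2.length)).foldr max 0)
      omega

lemma pv_sum_map_map_pow (d c : Nat) {α : Type} (l : List α)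
    (g : α → String × String × Bool × Nat) (hg : ∀ x, (g x).2.2.2 = c) :
    ((l.map g).map (fun e => d ^ e.2.2.2)).sum = l.length * d ^ c := by
  induction l with
  | nil => simp
  | cons a t ih =>
    simp only [List.map_cons, List.sum_cons, List.map_map] at ih ⊢
    rw [hg, ih]
    simp only [List.length_cons]
    ring

-- B's while loop over the explicit stack; each entry carries a depth budget
-- (a totality guard mirroring dfsA's fuel; never exhausted on Pre_ inputs).
def loopB (adj : List (String × List String)) :
    List (String × String × Bool × Nat) → List String → List String
  | [], lines => lines
  | (_, _, _, 0) :: rest, lines => loopB adj rest lines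
  | (name, pfx, is_last, f+1) :: rest, lines =>
    let line := pfx ++ (if is_last then "└─ " else "├─ ") ++ name
    let children := adjGet adj name
    let new_prefix := pfx ++ (if is_last then "   " else "│  ")
    loopB adj
      ((PySem.List.enumerate children).map
        (fun p => (p.2, new_prefix, decide (p.1 = (children.length : Int) - 1), f)) ++ rest)
      (lines ++ [line])
  termination_by es _ => (es.map (fun e => degB adj ^ e.2.2.2)).sum
  decreasing_by
  · simp
  · simp only [List.map_append, List.sum_append, List.map_cons, List.sum_cons]
    rw [pv_sum_map_map_pow (d := degB adj) (c := f) _ _ (fun x => rfl)]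
    rw [PySem.List.length_enumerate]
    have h2 : (adjGet adj name).length * degB adj ^ f < degB adj ^ (f+1) := by
      rw [pow_succ, Nat.mul_comm (degB adj ^ f)]
      exact mul_lt_mul_of_pos_right (adjGet_length_lt_degB adj name)
        (pow_pos (by unfold degB; omega) f)
    exact Nat.add_lt_add_right h2 _

def to_ascii_tree_alt (adj : List (String × List String)) (root : String) : String :=
  let kids := adjGet adj root
  let stack := (PySem.List.enumerate kids).map
      (fun p => (p.2, "", decide (p.1 = (kids.length : Int) - 1), adj.length + 2))
  PySem.Str.join "\n" (loopB adj stack [root])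

-- ===== PRECONDITION & SPEC =====
-- forward closure of a set of names under the adjacency (stable after adj.length+1 rounds)
def closR (adj : List (String × List String)) (s : List String) : List String :=
  (fun t => PySem.Set.ofList (t ++ t.flatMap (adjGet adj)))^[adj.length + 1] s

-- Pre_ excludes exactly the adjacency dicts with a cycle reachable from root: there the
-- Python A raises RecursionError (it never returns a value, and B's loop does not finish).
def Pre_to_ascii_tree (adj : List (String × List String)) (root : String) : Prop :=
  ∀ v ∈ closR adj [root], v ∉ closR adj (adjGet adj v)
instance (adj : List (String × List String)) (root : String) : Decidable (Pre_to_ascii_tree adj root) := by unfold Pre_to_ascii_tree; infer_instance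

def pvWitness_to_ascii_tree : (List (String × List String)) × String :=
  ([("a", ["b", "c"]), ("b", ["d"])], "a")

def Spec_to_ascii_tree (adj : List (String × List String)) (root : String) (out : String) : Prop := out = to_ascii_tree_alt adj root
instance (adj : List (String × List String)) (root : String) (out : String) : Decidable (Spec_to_ascii_tree adj root out) := by unfold Spec_to_ascii_tree; infer_instance

-- ===== CLAIM (what is proved, stated in full; the proofs are below) =====
def Claim_equal_to_ascii_tree : Prop := ∀ (adj : List (String × List String)) (root : String), Dom_to_ascii_tree adj root → Pre_to_ascii_tree adj root → Spec_to_ascii_tree adj root (to_ascii_tree adj root)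

-- ===== LEMMAS AND PROOFS =====

-- the worklist loop emits, for each stack entry in order, exactly the lines dfsA emits
lemma loopB_eq_flatMap (adj : List (String × List String)) :
    ∀ (es : List (String × String × Bool × Nat)) (lines : List String),
      loopB adj es lines = lines ++ es.flatMap (fun e => dfsA adj e.2.2.2 e.1 e.2.1 e.2.2.1) := by
  intro es lines
  induction es, lines using loopB.induct adj with
  | case1 lines => simp [loopB]
  | case2 a b c rest lines ih => rw [loopB, ih]; simp [dfsA]
  | case3 name pfx is_last f rest lines line children newp ih =>
    simp only [line, children, newp, dite_eq_ite] at ih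
    rw [loopB, ih]
    simp only [List.flatMap_append, List.flatMap_cons, List.append_assoc,
      List.singleton_append]
    congr 1
    rw [List.flatMap_map]
    show _ = dfsA adj (f+1) name pfx is_last ++ _
    rw [dfsA, PySem.List.foldl_append_eq_flatMap]
    simp

-- ===== VERDICT (by name: the statement is the Claim_ definition above) =====
theorem to_ascii_tree_spec : Claim_equal_to_ascii_tree := by
  intro adj root _ _
  show to_ascii_tree adj root = to_ascii_tree_alt adj root
  unfold to_ascii_tree to_ascii_tree_alt
  simp only [loopB_eq_flatMap, PySem.List.foldl_append_eq_flatMap, List.flatMap_map]
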